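-- pv_equiv track=rewrite | github.com/victorrgouvea/Trabalhos-CG | objects/bsplineSurface.py | curves_to_graphic_obj
-- ===== SOURCE A (Python) =====
-- def curves_to_graphic_obj(curves):
--     points = []
--     lines_indexes = []
--     point_to_index = {}
--     for curve in curves:
--         line_indexes = []
--         for point in curve:
--             if point not in point_to_index:
--                 point_to_index[point] = len(points)
--                 points.append(point)
--             line_indexes.append(point_to_index[point])
--         lines_indexes.append(line_indexes)
--     return points, lines_indexes
-- ===== SOURCE B (Python) =====
-- def curves_to_graphic_obj(curves):
--     # Positional characterization, no dict: a point's index is the number of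
--     # first-occurrence positions strictly before its own first occurrence in
--     # the flattened point stream.
--     flat = [p for curve in curves for p in curve]
--     n = len(flat)
--     first = [flat.index(p) for p in flat]   # first-occurrence position of each occurrence
--     points = [flat[i] for i in range(n) if first[i] == i]
--     # rank[i] = number of first occurrences at positions < i
--     rank = []
--     r = 0
--     for i in range(n):
--         rank.append(r)
--         if first[i] == i:
--             r += 1
--     lines_indexes = [[rank[flat.index(p)] for p in curve] for curve in curves]
--     return points, lines_indexes
-- ===== Notes on version B (the rewrite author's own statement) =====
-- stated objective: alternative
-- what changed: Replaces A's incremental dict-based dedup (a mutable point_to_index threaded through a fused dedup-and-emit loop) by a positional characterization with no dictionary: first-occurrence positions found by list scans (flat.index), points as the filter of self-first positions, and each index computed as a prefix count of first occurrences.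
import Mathlib
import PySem

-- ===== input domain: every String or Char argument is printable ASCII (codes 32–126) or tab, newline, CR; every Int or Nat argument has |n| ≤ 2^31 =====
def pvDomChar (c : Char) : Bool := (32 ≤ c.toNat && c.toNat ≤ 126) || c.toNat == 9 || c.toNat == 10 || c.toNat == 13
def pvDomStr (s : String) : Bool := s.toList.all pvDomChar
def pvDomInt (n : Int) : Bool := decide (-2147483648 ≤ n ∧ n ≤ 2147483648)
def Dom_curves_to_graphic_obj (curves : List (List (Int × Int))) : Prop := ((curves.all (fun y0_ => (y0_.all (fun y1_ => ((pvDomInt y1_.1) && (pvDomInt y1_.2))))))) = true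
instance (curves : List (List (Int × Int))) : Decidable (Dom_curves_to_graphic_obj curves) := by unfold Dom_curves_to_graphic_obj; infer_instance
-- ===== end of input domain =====

-- B replaces A's incremental dict-based dedup by a positional characterization (first-occurrence
-- positions via list scans and a prefix count of first occurrences); return value proved identical.

-- ===== PORT A =====
-- one iteration of A's inner loop: state = (points, point_to_index, line_indexes)
def ctgStep (acc : List (Int × Int) × PySem.Dict (Int × Int) Int × List Int)
    (point : Int × Int) : List (Int × Int) × PySem.Dict (Int × Int) Int × List Int :=
  let (points, d, line) := acc
  let (points, d) :=
    if d.contains point = false then (points ++ [point], d.insert point (points.length : Int))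
    else (points, d)
  (points, d, line ++ [d.getD point 0])

-- one iteration of A's outer loop: state = (points, lines_indexes, point_to_index)
def ctgCurve (st : List (Int × Int) × List (List Int) × PySem.Dict (Int × Int) Int)
    (curve : List (Int × Int)) : List (Int × Int) × List (List Int) × PySem.Dict (Int × Int) Int :=
  let inner := curve.foldl ctgStep (st.1, st.2.2, [])
  (inner.1, st.2.1 ++ [inner.2.2], inner.2.1)

def curves_to_graphic_obj (curves : List (List (Int × Int))) :
    (List (Int × Int)) × List (List Int) :=
  let st := curves.foldl ctgCurve ([], [], PySem.Dict.empty)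
  (st.1, st.2.1)

-- ===== PORT B =====
-- one iteration of Source B's rank loop: state = (rank, r)
def ctgbRankStep (first : List Nat) (st : List Int × Int) (i : Nat) : List Int × Int :=
  (st.1 ++ [st.2], if first.getD i 0 == i then st.2 + 1 else st.2)

-- Source B line by line; flat.index(p) always succeeds (p ∈ flat) and every index
-- is in range, so Option.getD / List.getD are exact here.
def curves_to_graphic_obj_alt (curves : List (List (Int × Int))) :
    (List (Int × Int)) × List (List Int) :=
  let flat := curves.flatMap (fun curve => curve)
  let n := flat.length
  let first : List Nat := flat.map (fun p => (PySem.List.index? flat p).getD 0)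
  let points := ((List.range n).filter (fun i => first.getD i 0 == i)).map (fun i => flat.getD i (0, 0))
  let rank := ((List.range n).foldl (ctgbRankStep first) ([], 0)).1
  let lines_indexes := curves.map (fun curve =>
    curve.map (fun p => rank.getD ((PySem.List.index? flat p).getD 0) 0))
  (points, lines_indexes)

-- ===== PRECONDITION & SPEC =====
def Spec_curves_to_graphic_obj (curves : List (List (Int × Int))) (out : (List (Int × Int)) × List (List Int)) : Prop := out = curves_to_graphic_obj_alt curves
instance (curves : List (List (Int × Int))) (out : (List (Int × Int)) × List (List Int)) : Decidable (Spec_curves_to_graphic_obj curves out) := by unfold Spec_curves_to_graphic_obj; infer_instance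

-- ===== CLAIM (what is proved, stated in full; the proofs are below) =====
def Claim_equal_curves_to_graphic_obj : Prop := ∀ (curves : List (List (Int × Int))), Dom_curves_to_graphic_obj curves → Spec_curves_to_graphic_obj curves (curves_to_graphic_obj curves)

-- ===== LEMMAS AND PROOFS =====

-- proof-side model of A's incremental state: (points, point_to_index) without the lines
def ctgAdd (st : List (Int × Int) × PySem.Dict (Int × Int) Int)
    (point : Int × Int) : List (Int × Int) × PySem.Dict (Int × Int) Int :=
  if st.2.contains point = false then (st.1 ++ [point], st.2.insert point (st.1.length : Int))
  else st

-- proof-side model of first-occurrence dedup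
def ddAdd (acc : List (Int × Int)) (p : Int × Int) : List (Int × Int) :=
  if p ∈ acc then acc else acc ++ [p]

-- Source B's first-occurrence condition at position j of l
def ctgCond (l : List (Int × Int)) (j : Nat) : Bool :=
  (l.map (fun p => (PySem.List.index? l p).getD 0)).getD j 0 == j

-- d' extends d: every binding of d is still a binding of d'
def CtgExt (d d' : PySem.Dict (Int × Int) Int) : Prop :=
  ∀ q v, d.get? q = some v → d'.get? q = some v

lemma ctgExt_refl (d : PySem.Dict (Int × Int) Int) : CtgExt d d := fun _ _ h => h

lemma ctgExt_addB (st : List (Int × Int) × PySem.Dict (Int × Int) Int) (p : Int × Int) :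
    CtgExt st.2 (ctgAdd st p).2 := by
  intro q v h
  unfold ctgAdd
  split
  · rename_i hc
    have hqp : q ≠ p := by
      intro he; subst he
      rw [PySem.Dict.contains_eq_isSome_get?, h] at hc
      simp at hc
    simpa [PySem.Dict.get?_insert_of_ne _ _ hqp] using h
  · exact h

lemma ctgExt_foldl_addB (l : List (Int × Int))
    (st : List (Int × Int) × PySem.Dict (Int × Int) Int) :
    CtgExt st.2 (l.foldl ctgAdd st).2 := by
  induction l generalizing st with
  | nil => exact ctgExt_refl _
  | cons p rest ih =>
      intro q v h
      exact ih (ctgAdd st p) q v (ctgExt_addB st p q v h)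

lemma ctgExt_foldl_curves (cs : List (List (Int × Int)))
    (st : List (Int × Int) × PySem.Dict (Int × Int) Int) :
    CtgExt st.2 (cs.foldl (fun st curve => curve.foldl ctgAdd st) st).2 := by
  induction cs generalizing st with
  | nil => exact ctgExt_refl _
  | cons c rest ih =>
      intro q v h
      exact ih _ q v (ctgExt_foldl_addB c st q v h)

-- after registering p, p is bound (to its getD value)
lemma ctgAdd_get?_self (st : List (Int × Int) × PySem.Dict (Int × Int) Int) (p : Int × Int) :
    (ctgAdd st p).2.get? p = some ((ctgAdd st p).2.getD p 0) := by
  unfold ctgAdd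
  split
  · simp [PySem.Dict.get?_insert_self, PySem.Dict.getD_insert_self]
  · rename_i hc
    simp only [Bool.not_eq_false] at hc
    rw [PySem.Dict.contains_eq_isSome_get?] at hc
    obtain ⟨v, hv⟩ := Option.isSome_iff_exists.mp hc
    rw [hv, PySem.Dict.getD_of_get?_eq_some _ 0 hv]

-- A's inner loop = the (points, dict) fold, with the line entries readable from ANY extension of the resulting dict
lemma ctg_inner (curve : List (Int × Int)) (pts : List (Int × Int))
    (d : PySem.Dict (Int × Int) Int) (line0 : List Int)
    (d' : PySem.Dict (Int × Int) Int)
    (hext : CtgExt (curve.foldl ctgAdd (pts, d)).2 d') :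
    curve.foldl ctgStep (pts, d, line0) =
      ((curve.foldl ctgAdd (pts, d)).1, (curve.foldl ctgAdd (pts, d)).2,
        line0 ++ curve.map (fun p => d'.getD p 0)) := by
  induction curve generalizing pts d line0 with
  | nil => simp
  | cons p rest ih =>
      have hstep : ctgStep (pts, d, line0) p =
          ((ctgAdd (pts, d) p).1, (ctgAdd (pts, d) p).2,
            line0 ++ [(ctgAdd (pts, d) p).2.getD p 0]) := by
        simp only [ctgStep, ctgAdd]
      have hbound := ctgAdd_get?_self (pts, d) p
      have hbound' : d'.get? p = some ((ctgAdd (pts, d) p).2.getD p 0) :=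
        hext p _ (ctgExt_foldl_addB rest (ctgAdd (pts, d) p) p _ hbound)
      have hval : d'.getD p 0 = (ctgAdd (pts, d) p).2.getD p 0 :=
        PySem.Dict.getD_of_get?_eq_some _ 0 hbound'
      have hext' : CtgExt (rest.foldl ctgAdd ((ctgAdd (pts, d) p).1, (ctgAdd (pts, d) p).2)).2 d' := by
        simpa using hext
      simp only [List.foldl_cons, hstep]
      rw [ih (ctgAdd (pts, d) p).1 (ctgAdd (pts, d) p).2 _ hext']
      simp [hval, List.append_assoc]

-- A's outer loop = the (points, dict) fold plus the mapped emission, for any extension d' of the final dict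
lemma ctg_outer (cs : List (List (Int × Int))) (pts : List (Int × Int))
    (lines : List (List Int)) (d : PySem.Dict (Int × Int) Int)
    (d' : PySem.Dict (Int × Int) Int)
    (hext : CtgExt (cs.foldl (fun st curve => curve.foldl ctgAdd st) (pts, d)).2 d') :
    cs.foldl ctgCurve (pts, lines, d) =
      ((cs.foldl (fun st curve => curve.foldl ctgAdd st) (pts, d)).1,
        lines ++ cs.map (fun curve => curve.map (fun p => d'.getD p 0)),
        (cs.foldl (fun st curve => curve.foldl ctgAdd st) (pts, d)).2) := by
  induction cs generalizing pts lines d with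
  | nil => simp
  | cons c rest ih =>
      have hext' : CtgExt (rest.foldl (fun st curve => curve.foldl ctgAdd st)
          ((c.foldl ctgAdd (pts, d)).1, (c.foldl ctgAdd (pts, d)).2)).2 d' := by
        simpa using hext
      have hinner := ctg_inner c pts d []
        d' (fun q v h => hext' q v (ctgExt_foldl_curves rest _ q v h))
      simp only [List.foldl_cons]
      have hc : ctgCurve (pts, lines, d) c =
          ((c.foldl ctgAdd (pts, d)).1, lines ++ [c.map (fun p => d'.getD p 0)],
            (c.foldl ctgAdd (pts, d)).2) := by
        simp only [ctgCurve, hinner]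
        simp
      rw [hc, ih _ _ _ hext']
      simp [List.append_assoc]

-- membership in the dedup fold
lemma mem_dd_foldl (l : List (Int × Int)) (s : List (Int × Int)) (q : Int × Int) :
    q ∈ l.foldl ddAdd s ↔ q ∈ s ∨ q ∈ l := by
  induction l generalizing s with
  | nil => simp
  | cons p rest ih =>
      simp only [List.foldl_cons, ih, ddAdd]
      split <;> rename_i hp
      · simp only [List.mem_cons]
        constructor
        · rintro (h | h)
          · exact Or.inl h
          · exact Or.inr (Or.inr h)
        · rintro (h | h | h)
          · exact Or.inl h
          · exact Or.inl (h ▸ hp)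
          · exact Or.inr h
      · simp [List.mem_append, or_assoc]

-- the dedup fold only appends to its seed
lemma dd_foldl_prefix (l : List (Int × Int)) (s : List (Int × Int)) :
    ∃ u, l.foldl ddAdd s = s ++ u := by
  induction l generalizing s with
  | nil => exact ⟨[], by simp⟩
  | cons p rest ih =>
      simp only [List.foldl_cons, ddAdd]
      split
      · exact ih s
      · obtain ⟨u, hu⟩ := ih (s ++ [p])
        exact ⟨[p] ++ u, by simp [hu]⟩

-- characterization of A's (points, dict) fold by the pure dedup fold
lemma ctg_fold_char (l : List (Int × Int)) :
    (l.foldl ctgAdd ([], PySem.Dict.empty)).1 = l.foldl ddAdd [] ∧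
    ∀ q, (l.foldl ctgAdd ([], PySem.Dict.empty)).2.get? q =
      (PySem.List.index? (l.foldl ddAdd []) q).map (fun k => (k : Int)) := by
  induction l using List.reverseRecOn with
  | nil =>
      refine ⟨rfl, fun q => ?_⟩
      rw [PySem.List.index?_eq_idxOf?]
      simp [PySem.Dict.get?_empty]
  | append_singleton l p ih =>
      obtain ⟨hP, hD⟩ := ih
      rw [List.foldl_append, List.foldl_append]
      simp only [List.foldl_cons, List.foldl_nil]
      set st := l.foldl ctgAdd ([], PySem.Dict.empty) with hst
      set dl := l.foldl ddAdd [] with hdl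
      have hcont : st.2.contains p = decide (p ∈ dl) := by
        rw [PySem.Dict.contains_eq_isSome_get?, hD p]
        rcases h : PySem.List.index? dl p with _ | k
        · have hnm : p ∉ dl := (PySem.List.index?_eq_none_iff _ _).mp h
          simp [hnm]
        · have hm : p ∈ dl := (PySem.List.index?_isSome_iff _ _).mp (by rw [h]; exact rfl)
          simp [hm]
      by_cases hmem : p ∈ dl
      · have hct : st.2.contains p = true := by rw [hcont]; simp [hmem]
        have hstep : ctgAdd st p = st := by
          unfold ctgAdd
          rw [hct]
          simp
        have hdd : ddAdd dl p = dl := by simp [ddAdd, hmem]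
        rw [hstep, hdd]
        exact ⟨hP, hD⟩
      · have hct : st.2.contains p = false := by rw [hcont]; simp [hmem]
        have hstep : ctgAdd st p = (st.1 ++ [p], st.2.insert p (st.1.length : Int)) := by
          unfold ctgAdd
          rw [hct]
          simp
        have hdd : ddAdd dl p = dl ++ [p] := by simp [ddAdd, hmem]
        rw [hstep, hdd]
        refine ⟨by simp [hP], fun q => ?_⟩
        by_cases hq : q = p
        · subst hq
          rw [PySem.Dict.get?_insert_self,
            PySem.List.index?_append_singleton_self _ _ hmem]
          simp [hP]
        · rw [PySem.Dict.get?_insert_of_ne _ _ hq, hD q]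
          by_cases hq2 : q ∈ dl
          · rw [PySem.List.index?_append_of_mem _ hq2]
          · have h1 : PySem.List.index? dl q = none :=
              (PySem.List.index?_eq_none_iff _ _).mpr hq2
            have h2 : PySem.List.index? (dl ++ [p]) q = none := by
              refine (PySem.List.index?_eq_none_iff _ _).mpr ?_
              simp [hq2, hq]
            rw [h1, h2]

-- the first occurrence of p sits where the dedup fold registered it
lemma index?_dd (pre suf : List (Int × Int)) (p : Int × Int) (h : p ∉ pre) :
    PySem.List.index? ((pre ++ p :: suf).foldl ddAdd []) p =
      some (pre.foldl ddAdd []).length := by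
  have hnot : p ∉ pre.foldl ddAdd [] := by
    rw [mem_dd_foldl]
    simp [h]
  have hstep : (pre ++ p :: suf).foldl ddAdd []
      = suf.foldl ddAdd (pre.foldl ddAdd [] ++ [p]) := by
    rw [List.foldl_append, List.foldl_cons]
    simp [ddAdd, hnot]
  obtain ⟨u, hu⟩ := dd_foldl_prefix suf (pre.foldl ddAdd [] ++ [p])
  rw [hstep, hu]
  rw [PySem.List.index?_append_of_mem _ (by simp : p ∈ pre.foldl ddAdd [] ++ [p])]
  exact PySem.List.index?_append_singleton_self _ p hnot

-- the first-occurrence condition at position m reads "not seen before m"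
lemma ctgCond_iff (l : List (Int × Int)) (m : Nat) (hm : m < l.length) :
    ctgCond l m = true ↔ l[m] ∉ l.take m := by
  have hval : (l.map (fun p => (PySem.List.index? l p).getD 0)).getD m 0
      = (PySem.List.index? l l[m]).getD 0 := by
    rw [List.getD_eq_getElem?_getD, List.getElem?_map]
    simp [List.getElem?_eq_getElem hm]
  unfold ctgCond
  rw [hval]
  have hmem : l[m] ∈ l := List.getElem_mem hm
  obtain ⟨k, hk⟩ := Option.isSome_iff_exists.mp ((PySem.List.index?_isSome_iff _ _).mpr hmem)
  obtain ⟨hklt, hkeq, hkmin⟩ := PySem.List.getElem_of_index?_eq_some hk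
  rw [hk]
  simp only [Option.getD_some, beq_iff_eq]
  constructor
  · intro hkm hin
    subst hkm
    obtain ⟨j, hj, hjeq⟩ := List.mem_take_iff_getElem.mp hin
    exact hkmin j (by omega) (by simpa using hjeq)
  · intro hnin
    by_contra hne
    rcases Nat.lt_or_ge k m with hlt | hge
    · exact hnin (List.mem_take_iff_getElem.mpr ⟨k, by omega, by simpa using hkeq⟩)
    · have hmk : m < k := by omega
      exact hkmin m hmk rfl

-- counting first occurrences below m = size of the dedup of the length-m prefix
lemma count_cond (l : List (Int × Int)) (m : Nat) (hm : m ≤ l.length) :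
    ((List.range m).countP (fun j => ctgCond l j)) = ((l.take m).foldl ddAdd []).length := by
  induction m with
  | zero => simp
  | succ m ih =>
      have hm' : m < l.length := by omega
      rw [List.range_succ, List.countP_append, ih (by omega),
        List.take_succ_eq_append_getElem hm', List.foldl_append]
      simp only [List.foldl_cons, List.foldl_nil, List.countP_singleton]
      have hmemtake : l[m] ∈ (l.take m).foldl ddAdd [] ↔ l[m] ∈ l.take m := by
        rw [mem_dd_foldl]
        simp
      by_cases hfirst : l[m] ∈ l.take m
      · have : ctgCond l m = false := by
          rcases Bool.eq_false_or_eq_true (ctgCond l m) with h | h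
          · exact absurd hfirst ((ctgCond_iff l m hm').mp h)
          · exact h
        simp [this, ddAdd, hmemtake.mpr hfirst]
      · have : ctgCond l m = true := (ctgCond_iff l m hm').mpr hfirst
        have hnot : l[m] ∉ (l.take m).foldl ddAdd [] := fun hc => hfirst (hmemtake.mp hc)
        simp [this, ddAdd, hnot]

-- B's points list is the dedup fold
lemma points_char (l : List (Int × Int)) :
    (((List.range l.length).filter (fun i => ctgCond l i)).map (fun i => l.getD i (0, 0))) =
      l.foldl ddAdd [] := by
  induction l using List.reverseRecOn with
  | nil => simp
  | append_singleton l p ih =>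
      have hlen : (l ++ [p]).length = l.length + 1 := by simp
      have hcond : ∀ i, i < l.length → ctgCond (l ++ [p]) i = ctgCond l i := by
        intro i hi
        unfold ctgCond
        have h1 : ((l ++ [p]).map (fun q => (PySem.List.index? (l ++ [p]) q).getD 0)).getD i 0
            = (PySem.List.index? (l ++ [p]) l[i]).getD 0 := by
          rw [List.getD_eq_getElem?_getD, List.getElem?_map]
          have : (l ++ [p])[i]? = some l[i] := by
            rw [List.getElem?_append_left hi]
            simp [List.getElem?_eq_getElem hi]
          rw [this]
          simp
        have h2 : (l.map (fun q => (PySem.List.index? l q).getD 0)).getD i 0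
            = (PySem.List.index? l l[i]).getD 0 := by
          rw [List.getD_eq_getElem?_getD, List.getElem?_map]
          simp [List.getElem?_eq_getElem hi]
        rw [h1, h2, PySem.List.index?_append_of_mem _ (List.getElem_mem hi)]
      rw [hlen, List.range_succ, List.filter_append, List.map_append, List.foldl_append]
      have hfiltereq : (List.range l.length).filter (fun i => ctgCond (l ++ [p]) i)
          = (List.range l.length).filter (fun i => ctgCond l i) := by
        apply List.filter_congr
        intro i hi
        exact hcond i (List.mem_range.mp hi)
      have hmapeq : ((List.range l.length).filter (fun i => ctgCond l i)).map
            (fun i => (l ++ [p]).getD i (0, 0))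
          = ((List.range l.length).filter (fun i => ctgCond l i)).map (fun i => l.getD i (0, 0)) := by
        apply List.map_congr_left
        intro i hi
        have hilt : i < l.length := List.mem_range.mp (List.mem_of_mem_filter hi)
        rw [List.getD_eq_getElem?_getD, List.getD_eq_getElem?_getD,
          List.getElem?_append_left hilt]
      rw [hfiltereq, hmapeq, ih]
      simp only [List.foldl_cons, List.foldl_nil]
      have hlastcond : ctgCond (l ++ [p]) l.length = true ↔ p ∉ l := by
        have := ctgCond_iff (l ++ [p]) l.length (by simp)
        rw [this]
        have hgp : (l ++ [p])[l.length] = p := by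
          simp
        rw [hgp]
        have : (l ++ [p]).take l.length = l := by
          simp
        rw [this]
      by_cases hp : p ∈ l
      · have hc : ctgCond (l ++ [p]) l.length = false := by
          rcases Bool.eq_false_or_eq_true (ctgCond (l ++ [p]) l.length) with h | h
          · exact absurd (hlastcond.mp h) (by simp [hp])
          · exact h
        have hpd : p ∈ l.foldl ddAdd [] := (mem_dd_foldl l [] p).mpr (Or.inr hp)
        simp [hc, ddAdd, hpd]
      · have hc : ctgCond (l ++ [p]) l.length = true := hlastcond.mpr hp
        have hpd : p ∉ l.foldl ddAdd [] := by
          rw [mem_dd_foldl]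
          simp [hp]
        simp [hc, ddAdd, hpd, List.getD_eq_getElem?_getD]

-- B's rank loop computes the prefix counts of first occurrences
lemma rank_char (first : List Nat) (m : Nat) :
    (List.range m).foldl (ctgbRankStep first) ([], 0) =
      ((List.range m).map (fun i =>
          (((List.range i).countP (fun j => first.getD j 0 == j)) : Int)),
        (((List.range m).countP (fun j => first.getD j 0 == j)) : Int)) := by
  induction m with
  | zero => simp
  | succ m ih =>
      rw [List.range_succ, List.foldl_append, ih, List.map_append, List.countP_append]
      simp [ctgbRankStep, List.countP_cons]
      split <;> simp

-- per-point agreement: A's dict value = B's rank value, for every point of the flattened stream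
lemma ctg_point_eq (flat : List (Int × Int)) (p : Int × Int) (hp : p ∈ flat) :
    (flat.foldl ctgAdd ([], PySem.Dict.empty)).2.getD p 0 =
      (((List.range flat.length).map (fun i =>
          (((List.range i).countP (fun j => ctgCond flat j)) : Int))).getD
        ((PySem.List.index? flat p).getD 0) 0) := by
  obtain ⟨hP, hD⟩ := ctg_fold_char flat
  obtain ⟨k, hk⟩ := Option.isSome_iff_exists.mp ((PySem.List.index?_isSome_iff _ _).mpr hp)
  obtain ⟨pre, suf, hdec, hlen, hpre⟩ := (PySem.List.index?_eq_some_iff _ _ _).mp hk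
  have hkn : k < flat.length := by
    rw [hdec]
    simp [← hlen]
  -- left side
  have hidd : PySem.List.index? (flat.foldl ddAdd []) p = some (pre.foldl ddAdd []).length := by
    rw [hdec]
    exact index?_dd pre suf p hpre
  have hget : (flat.foldl ctgAdd ([], PySem.Dict.empty)).2.get? p
      = some (((pre.foldl ddAdd []).length : Nat) : Int) := by
    rw [hD p, hidd]
    rfl
  have hL : (flat.foldl ctgAdd ([], PySem.Dict.empty)).2.getD p 0
      = (((pre.foldl ddAdd []).length : Nat) : Int) :=
    PySem.Dict.getD_of_get?_eq_some _ 0 hget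
  -- right side
  have hR : (((List.range flat.length).map (fun i =>
        (((List.range i).countP (fun j => ctgCond flat j)) : Int))).getD
        ((PySem.List.index? flat p).getD 0) 0)
      = (((List.range k).countP (fun j => ctgCond flat j)) : Int) := by
    rw [hk]
    simp only [Option.getD_some]
    rw [List.getD_eq_getElem?_getD, List.getElem?_map]
    simp [List.getElem?_range hkn]
  have hcnt : ((List.range k).countP (fun j => ctgCond flat j))
      = (pre.foldl ddAdd []).length := by
    have := count_cond flat k (le_of_lt hkn)
    rw [this, hdec, ← hlen, List.take_left]
  rw [hL, hR, hcnt]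

-- ===== VERDICT (by name: the statement is the Claim_ definition above) =====
theorem curves_to_graphic_obj_spec : Claim_equal_curves_to_graphic_obj := by
  intro curves _
  unfold Spec_curves_to_graphic_obj
  simp only [curves_to_graphic_obj, curves_to_graphic_obj_alt]
  have hflat : curves.flatMap (fun curve => curve) = curves.flatten := by simp
  rw [hflat]
  have hS : curves.foldl (fun st curve => curve.foldl ctgAdd st) ([], PySem.Dict.empty)
      = curves.flatten.foldl ctgAdd ([], PySem.Dict.empty) :=
    List.foldl_flatten.symm
  have hA := ctg_outer curves [] [] PySem.Dict.empty
    (curves.flatten.foldl ctgAdd ([], PySem.Dict.empty)).2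
    (by rw [hS]; exact ctgExt_refl _)
  rw [hA, hS]
  obtain ⟨hP, hD⟩ := ctg_fold_char curves.flatten
  have hpoints := points_char curves.flatten
  simp only [ctgCond] at hpoints
  have hrank := rank_char (curves.flatten.map
      (fun p => (PySem.List.index? curves.flatten p).getD 0)) curves.flatten.length
  refine Prod.ext ?_ ?_
  · exact hP.trans hpoints.symm
  · simp only [List.nil_append]
    rw [hrank]
    refine List.map_congr_left ?_
    intro c hc
    refine List.map_congr_left ?_
    intro p hpc
    have hp : p ∈ curves.flatten := List.mem_flatten.mpr ⟨c, hc, hpc⟩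
    have := ctg_point_eq curves.flatten p hp
    simp only [ctgCond] at this
    exact this
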